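-- pv_equiv track=rewrite | github.com/HonzaBalvan/zapisy | CUNI/ZS 25-26/prog/05/partition2.py | deliciBod
-- ===== SOURCE A (Python) =====
-- def minimum(posloupnost):
--     min = posloupnost[0]
--
--     for i in posloupnost:
--         if i < min:
--             min = i
--
--     return min
--
-- def maximum(posloupnost):
--     max = posloupnost[0]
--
--     for i in posloupnost:
--         if i > max:
--             max = i
--
--     return max
--
-- def deliciBod(posloupnost):
--     if len(posloupnost) == 0:
--         return -1
--
--     if len(posloupnost) == 1:
--         return 0
--
--     pravaPosloupnostNulta = posloupnost[1:]
--     levaPosloupnostPosledni = posloupnost[:-1]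
--
--     minNulte = minimum(pravaPosloupnostNulta)
--     maxPosledni = maximum(levaPosloupnostPosledni)
--
--     if posloupnost[0] < minNulte:
--         return 0
--
--     for i in range(1, len(posloupnost) - 1):
--         levaPosloupnost = posloupnost[:i]
--         pravaPosloupnost = posloupnost[i+1:]
--
--         max = maximum(levaPosloupnost)
--         min = minimum(pravaPosloupnost)
--
--         if max < posloupnost[i] and posloupnost[i] < min:
--             return i
--
--     if posloupnost[-1] > maxPosledni:
--         return len(posloupnost) - 1
--
--     return -1
-- ===== SOURCE B (Python) =====
-- def deliciBod(posloupnost):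
--     n = len(posloupnost)
--     if n == 0:
--         return -1
--     # pref[i] = max(posloupnost[:i+1]), built in one forward pass
--     pref = []
--     cur = posloupnost[0]
--     for x in posloupnost:
--         cur = cur if cur >= x else x
--         pref.append(cur)
--     # suf[i] = min(posloupnost[i:]), built in one backward pass
--     suf = []
--     cur = posloupnost[-1]
--     for x in reversed(posloupnost):
--         cur = cur if cur <= x else x
--         suf.append(cur)
--     suf.reverse()
--     for i in range(n):
--         if (i == 0 or pref[i - 1] < posloupnost[i]) and (i == n - 1 or posloupnost[i] < suf[i + 1]):
--             return i
--     return -1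
-- ===== Notes on version B (the rewrite author's own statement) =====
-- stated objective: faster
-- what changed: A rescans the whole left part (max) and right part (min) at every candidate index, plus separate special-case code for the first and last index; B precomputes a prefix-max array and a suffix-min array in two linear passes and finds the first partition index in one uniform scan.
import Mathlib
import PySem

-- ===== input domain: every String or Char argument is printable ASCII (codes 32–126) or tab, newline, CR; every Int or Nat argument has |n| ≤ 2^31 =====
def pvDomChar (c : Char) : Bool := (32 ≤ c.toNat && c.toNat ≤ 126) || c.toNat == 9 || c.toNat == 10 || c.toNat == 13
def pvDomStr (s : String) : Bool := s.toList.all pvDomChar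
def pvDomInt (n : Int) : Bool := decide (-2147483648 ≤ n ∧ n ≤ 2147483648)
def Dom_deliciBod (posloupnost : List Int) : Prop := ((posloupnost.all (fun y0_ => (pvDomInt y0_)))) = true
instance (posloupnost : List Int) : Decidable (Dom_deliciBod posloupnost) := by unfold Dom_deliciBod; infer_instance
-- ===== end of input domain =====

-- B replaces A's quadratic rescan of both sides at every index by prefix-max / suffix-min arrays and one linear scan (objective: faster, O(n) vs O(n^2)).

-- ===== PORT A =====
-- minimum(posloupnost): A only ever calls it on nonempty lists, so the [] case (0) is unreachable
def pyMinA : List Int → Int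
  | [] => 0
  | h :: t => (h :: t).foldl (fun m i => if i < m then i else m) h

def pyMaxA : List Int → Int
  | [] => 0
  | h :: t => (h :: t).foldl (fun m i => if m < i then i else m) h

-- the 'for i in range(1, len(posloupnost) - 1)' loop with its early return
def loopA (p : List Int) : List Int → Option Int
  | [] => none
  | i :: rest =>
    if pyMaxA (PySem.List.slice p none (some i)) < PySem.List.pyGetD p i 0 ∧
       PySem.List.pyGetD p i 0 < pyMinA (PySem.List.slice p (some (i + 1)) none) then some i
    else loopA p rest

def deliciBod (posloupnost : List Int) : Int :=
  if posloupnost.length = 0 then -1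
  else if posloupnost.length = 1 then 0
  else
    let minNulte := pyMinA (PySem.List.slice posloupnost (some 1) none)
    let maxPosledni := pyMaxA (PySem.List.slice posloupnost none (some (-1)))
    if PySem.List.pyGetD posloupnost 0 0 < minNulte then 0
    else
      match loopA posloupnost (PySem.List.pyRange 1 ((posloupnost.length : Int) - 1) 1) with
      | some i => i
      | none =>
        if maxPosledni < PySem.List.pyGetD posloupnost (-1) 0 then (posloupnost.length : Int) - 1
        else -1

-- ===== PORT B =====
-- one forward-pass step: cur = cur if cur >= x else x; pref.append(cur)
def stepMaxB (st : Int × List Int) (x : Int) : Int × List Int :=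
  let cur := if st.1 ≥ x then st.1 else x
  (cur, st.2 ++ [cur])

-- one backward-pass step: cur = cur if cur <= x else x; suf.append(cur)
def stepMinB (st : Int × List Int) (x : Int) : Int × List Int :=
  let cur := if st.1 ≤ x then st.1 else x
  (cur, st.2 ++ [cur])

-- the final 'for i in range(n)' scan with its early return
def scanB (p pref suf : List Int) (n : Int) : List Int → Int
  | [] => -1
  | i :: rest =>
    if (i = 0 ∨ PySem.List.pyGetD pref (i - 1) 0 < PySem.List.pyGetD p i 0) ∧
       (i = n - 1 ∨ PySem.List.pyGetD p i 0 < PySem.List.pyGetD suf (i + 1) 0) then i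
    else scanB p pref suf n rest

def deliciBod_alt (posloupnost : List Int) : Int :=
  let n : Int := posloupnost.length
  if n = 0 then -1
  else
    let pref := (posloupnost.foldl stepMaxB (PySem.List.pyGetD posloupnost 0 0, [])).2
    let suf := ((posloupnost.reverse.foldl stepMinB (PySem.List.pyGetD posloupnost (-1) 0, [])).2).reverse
    scanB posloupnost pref suf n (PySem.List.pyRange 0 n 1)

-- ===== PRECONDITION & SPEC =====
def Spec_deliciBod (posloupnost : List Int) (out : Int) : Prop := out = deliciBod_alt posloupnost
instance (posloupnost : List Int) (out : Int) : Decidable (Spec_deliciBod posloupnost out) := by unfold Spec_deliciBod; infer_instance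

-- ===== CLAIM (what is proved, stated in full; the proofs are below) =====
def Claim_equal_deliciBod : Prop := ∀ (posloupnost : List Int), Dom_deliciBod posloupnost → Spec_deliciBod posloupnost (deliciBod posloupnost)

-- ===== LEMMAS AND PROOFS =====

-- Reference: index i is a partition point iff everything left of it is smaller and everything right of it is larger.
def condR (p : List Int) (i : Nat) : Bool :=
  (p.take i).all (fun x => decide (x < p.getD i 0)) && (p.drop (i + 1)).all (fun x => decide (p.getD i 0 < x))

def refP (p : List Int) : Int :=
  match (List.range p.length).find? (condR p) with
  | some i => (i : Int)
  | none => -1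

-- foldl max/min brackets
lemma foldl_max_lt (l : List Int) (c v : Int) :
    l.foldl max c < v ↔ c < v ∧ ∀ x ∈ l, x < v := by
  induction l generalizing c with
  | nil => simp
  | cons h t ih => simp [ih]; tauto

lemma lt_foldl_min (l : List Int) (c v : Int) :
    v < l.foldl min c ↔ v < c ∧ ∀ x ∈ l, v < x := by
  induction l generalizing c with
  | nil => simp
  | cons h t ih => simp [ih]; tauto

lemma pyMinA_eq (h : Int) (t : List Int) : pyMinA (h :: t) = t.foldl min h := by
  have : (fun (m i : Int) => if i < m then i else m) = min := by
    funext m i; simp [min_def]; omega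
  simp [pyMinA, this]

lemma pyMaxA_eq (h : Int) (t : List Int) : pyMaxA (h :: t) = t.foldl max h := by
  have : (fun (m i : Int) => if m < i then i else m) = max := by
    funext m i; simp [max_def]; omega
  simp [pyMaxA, this]

lemma pyMaxA_lt (h : Int) (t : List Int) (v : Int) :
    pyMaxA (h :: t) < v ↔ ∀ x ∈ h :: t, x < v := by
  rw [pyMaxA_eq, foldl_max_lt]; simp
lemma lt_pyMinA (h : Int) (t : List Int) (v : Int) :
    v < pyMinA (h :: t) ↔ ∀ x ∈ h :: t, v < x := by
  rw [pyMinA_eq, lt_foldl_min]; simp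

-- prefix-max / suffix-min accumulators
def prefL (c : Int) : List Int → List Int
  | [] => []
  | x :: t => max c x :: prefL (max c x) t

def sufL (c : Int) : List Int → List Int
  | [] => []
  | x :: t => min c x :: sufL (min c x) t

lemma foldl_stepMaxB (l : List Int) (c : Int) (acc : List Int) :
    l.foldl stepMaxB (c, acc) = (l.foldl max c, acc ++ prefL c l) := by
  induction l generalizing c acc with
  | nil => simp [prefL]
  | cons x t ih =>
    have : (if c ≥ x then c else x) = max c x := by simp [max_def]; omega
    simp [stepMaxB, this, ih, prefL]

lemma foldl_stepMinB (l : List Int) (c : Int) (acc : List Int) :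
    l.foldl stepMinB (c, acc) = (l.foldl min c, acc ++ sufL c l) := by
  induction l generalizing c acc with
  | nil => simp [sufL]
  | cons x t ih =>
    have : (if c ≤ x then c else x) = min c x := by simp [min_def]
    simp [stepMinB, this, ih, sufL]

lemma sufL_length (c : Int) (l : List Int) : (sufL c l).length = l.length := by
  induction l generalizing c with
  | nil => simp [sufL]
  | cons x t ih => simp [sufL, ih]

lemma prefL_getD (c : Int) (l : List Int) (j : Nat) (hj : j < l.length) :
    (prefL c l).getD j 0 = (l.take (j + 1)).foldl max c := by
  induction l generalizing c j with
  | nil => simp at hj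
  | cons x t ih =>
    cases j with
    | zero => simp [prefL]
    | succ j => simpa [prefL] using ih (max c x) j (by simpa using hj)

lemma sufL_getD (c : Int) (l : List Int) (j : Nat) (hj : j < l.length) :
    (sufL c l).getD j 0 = (l.take (j + 1)).foldl min c := by
  induction l generalizing c j with
  | nil => simp at hj
  | cons x t ih =>
    cases j with
    | zero => simp [sufL]
    | succ j => simpa [sufL] using ih (min c x) j (by simpa using hj)

-- search = find?
lemma loopA_eq_find? (p : List Int) (l : List Int) :
    loopA p l = l.find? (fun i =>
      decide (pyMaxA (PySem.List.slice p none (some i)) < PySem.List.pyGetD p i 0 ∧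
        PySem.List.pyGetD p i 0 < pyMinA (PySem.List.slice p (some (i + 1)) none))) := by
  induction l with
  | nil => rfl
  | cons i rest ih =>
    simp only [loopA, List.find?]
    split_ifs with h <;> simp [h, ih]

lemma scanB_eq_find? (p pref suf : List Int) (n : Int) (l : List Int) :
    scanB p pref suf n l = (match l.find? (fun i =>
      decide ((i = 0 ∨ PySem.List.pyGetD pref (i - 1) 0 < PySem.List.pyGetD p i 0) ∧
        (i = n - 1 ∨ PySem.List.pyGetD p i 0 < PySem.List.pyGetD suf (i + 1) 0))) with
      | some i => i | none => -1) := by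
  induction l with
  | nil => rfl
  | cons i rest ih =>
    simp only [scanB, List.find?]
    split_ifs with h <;> simp [h, ih]

lemma find?_congr' {α : Type} (l : List α) (p q : α → Bool) (h : ∀ x ∈ l, p x = q x) :
    l.find? p = l.find? q := by
  induction l with
  | nil => rfl
  | cons x t ih =>
    simp only [List.find?, h x (by simp)]
    cases q x <;> simp [ih (fun y hy => h y (List.mem_cons_of_mem _ hy))]

lemma getLast_mem_drop (l : List Int) (h : l ≠ []) (m : Nat) (hm : m < l.length) :
    l.getLast h ∈ l.drop m := by
  have hne : l.drop m ≠ [] := by simp [List.drop_eq_nil_iff]; omega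
  rw [← List.getLast_drop (l := l) hne]
  exact List.getLast_mem hne

lemma pyMaxA_lt' (l : List Int) (hl : l ≠ []) (v : Int) :
    pyMaxA l < v ↔ ∀ x ∈ l, x < v := by
  cases l with
  | nil => exact absurd rfl hl
  | cons h t => exact pyMaxA_lt h t v

lemma lt_pyMinA' (l : List Int) (hl : l ≠ []) (v : Int) :
    v < pyMinA l ↔ ∀ x ∈ l, v < x := by
  cases l with
  | nil => exact absurd rfl hl
  | cons h t => exact lt_pyMinA h t v

lemma head_mem_take (p : List Int) (hp : p ≠ []) (k : Nat) (hk : 1 ≤ k) :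
    p.getD 0 0 ∈ p.take k := by
  cases p with
  | nil => exact absurd rfl hp
  | cons h t =>
    cases k with
    | zero => omega
    | succ k => simp

lemma condR_iff (p : List Int) (k : Nat) :
    condR p k = true ↔ (∀ x ∈ p.take k, x < p.getD k 0) ∧ (∀ x ∈ p.drop (k + 1), p.getD k 0 < x) := by
  simp [condR]

lemma B_left_cond (p : List Int) (k : Nat) (hk : k < p.length) (hk1 : 1 ≤ k) :
    (prefL (p.getD 0 0) p).getD (k - 1) 0 < p.getD k 0 ↔ ∀ x ∈ p.take k, x < p.getD k 0 := by
  rw [prefL_getD _ _ _ (by omega)]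
  have hk1' : k - 1 + 1 = k := by omega
  rw [hk1', foldl_max_lt]
  constructor
  · exact fun hh => hh.2
  · intro hall
    exact ⟨hall _ (head_mem_take p (by intro hnil; subst hnil; simp at hk) k hk1), hall⟩

lemma B_right_cond (p : List Int) (hp : p ≠ []) (k : Nat) (hk : k + 1 < p.length) :
    p.getD k 0 < ((sufL (p.getLast hp) p.reverse).reverse).getD (k + 1) 0 ↔
      ∀ x ∈ p.drop (k + 1), p.getD k 0 < x := by
  have hlen : (sufL (p.getLast hp) p.reverse).length = p.length := by
    rw [sufL_length, List.length_reverse]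
  rw [List.getD_eq_getElem?_getD (l := (sufL (p.getLast hp) p.reverse).reverse),
    List.getElem?_reverse (by rw [hlen]; omega), hlen,
    ← List.getD_eq_getElem?_getD, sufL_getD _ _ _ (by rw [List.length_reverse]; omega)]
  have he : p.length - 1 - (k + 1) + 1 = p.length - (k + 1) := by omega
  rw [he, ← List.reverse_drop, lt_foldl_min]
  constructor
  · rintro ⟨_, hall⟩ x hx
    exact hall x (by simpa using hx)
  · intro hall
    exact ⟨hall _ (getLast_mem_drop p hp (k + 1) hk), fun x hx => hall x (by simpa using hx)⟩

lemma condB_eq (p : List Int) (hp : p ≠ []) (j : Nat) (hj : j < p.length) :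
    (decide ((((j : Int) = 0) ∨
        PySem.List.pyGetD (prefL (p.getD 0 0) p) ((j : Int) - 1) 0 < PySem.List.pyGetD p (j : Int) 0) ∧
      (((j : Int) = (p.length : Int) - 1) ∨
        PySem.List.pyGetD p (j : Int) 0 < PySem.List.pyGetD ((sufL (p.getLast hp) p.reverse).reverse) ((j : Int) + 1) 0)))
      = condR p j := by
  rw [Bool.eq_iff_iff, decide_eq_true_eq, condR_iff]
  constructor
  · rintro ⟨hl, hr⟩
    constructor
    · rcases hl with h0 | hl
      · have : j = 0 := by exact_mod_cast h0
        subst this; simp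
      · rcases Nat.eq_zero_or_pos j with h0 | h1
        · subst h0; simp
        · rw [show ((j : Int) - 1) = ((j - 1 : Nat) : Int) by push_cast [h1]; omega,
            PySem.List.pyGetD_natCast, PySem.List.pyGetD_natCast] at hl
          exact (B_left_cond p j hj h1).mp hl
    · rcases hr with hlast | hr
      · have : j = p.length - 1 := by omega
        subst this
        rw [show p.length - 1 + 1 = p.length by omega]
        simp
      · by_cases hle : j + 1 < p.length
        · rw [show ((j : Int) + 1) = ((j + 1 : Nat) : Int) by push_cast; ring,
            PySem.List.pyGetD_natCast, PySem.List.pyGetD_natCast] at hr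
          exact (B_right_cond p hp j hle).mp hr
        · rw [show j + 1 = p.length by omega]
          simp
  · rintro ⟨hl, hr⟩
    constructor
    · rcases Nat.eq_zero_or_pos j with h0 | h1
      · left; exact_mod_cast congrArg (Nat.cast : Nat → Int) h0
      · right
        rw [show ((j : Int) - 1) = ((j - 1 : Nat) : Int) by push_cast [h1]; omega,
          PySem.List.pyGetD_natCast, PySem.List.pyGetD_natCast]
        exact (B_left_cond p j hj h1).mpr hl
    · by_cases hle : j + 1 < p.length
      · right
        rw [show ((j : Int) + 1) = ((j + 1 : Nat) : Int) by push_cast; ring,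
          PySem.List.pyGetD_natCast, PySem.List.pyGetD_natCast]
        exact (B_right_cond p hp j hle).mpr hr
      · left; omega

lemma B_eq_ref (p : List Int) : deliciBod_alt p = refP p := by
  rcases hp' : p with _ | ⟨h, t⟩
  · rfl
  have hp : (h :: t) ≠ [] := by simp
  have hn0 : ((h :: t).length : Int) ≠ 0 := by simp; omega
  unfold deliciBod_alt
  rw [if_neg hn0, foldl_stepMaxB, foldl_stepMinB]
  simp only [PySem.List.pyGetD_zero_cons, PySem.List.pyGetD_neg_one _ _ hp]
  rw [scanB_eq_find?, PySem.List.pyRange_zero_nat, List.find?_map]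
  have hgd : (h :: t).getD 0 0 = h := rfl
  rw [find?_congr' _ _ (condR (h :: t)) (by
    intro j hj
    have hj' : j < (h :: t).length := by simpa using List.mem_range.mp hj
    simpa [hgd] using condB_eq (h :: t) hp j hj')]
  unfold refP
  cases (List.range (h :: t).length).find? (condR (h :: t)) <;> simp

lemma A_eq_ref (p : List Int) : deliciBod p = refP p := by
  rcases p with _ | ⟨h, t⟩
  · rfl
  rcases t with _ | ⟨h2, t⟩
  · rfl
  have hp : (h :: h2 :: t) ≠ [] := by simp
  have hlen : (h :: h2 :: t).length = t.length + 2 := by simp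
  -- the middle loop is the search for the first middle partition point
  have hloop : loopA (h :: h2 :: t) (PySem.List.pyRange 1 (((h :: h2 :: t).length : Int) - 1) 1)
      = ((List.range t.length).find? (fun j => condR (h :: h2 :: t) (j + 1))).map
          (fun j : Nat => ((1 : Int) + (j : Int))) := by
    rw [loopA_eq_find?, PySem.List.pyRange_one, List.find?_map]
    rw [show ((((h :: h2 :: t).length : Int) - 1) - 1).toNat = t.length by rw [hlen]; omega]
    congr 1
    apply find?_congr'
    intro j hj
    have hjm : j < t.length := List.mem_range.mp hj
    show decide _ = condR (h :: h2 :: t) (j + 1)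
    rw [Bool.eq_iff_iff, decide_eq_true_eq, condR_iff]
    rw [PySem.List.slice_to _ (by omega : (0:Int) ≤ 1 + (j:Int)),
      PySem.List.slice_from _ (by omega : (0:Int) ≤ 1 + (j:Int) + 1),
      show ((1:Int) + (j:Int)).toNat = j + 1 by omega,
      show ((1:Int) + (j:Int) + 1).toNat = j + 2 by omega]
    simp only [show ((1:Int) + (j:Int)) = ((j + 1 : Nat) : Int) from by push_cast; ring,
      PySem.List.pyGetD_natCast]
    have htk : (h :: h2 :: t).take (j + 1) ≠ [] := by simp
    have hdr : (h :: h2 :: t).drop (j + 2) ≠ [] := by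
      simp [List.drop_eq_nil_iff]; omega
    rw [pyMaxA_lt' _ htk, lt_pyMinA' _ hdr]
  have hdl : (h :: h2 :: t).dropLast ≠ [] := by
    intro hc
    have := congrArg List.length hc
    simp at this
  -- the trailing check is the partition condition at the last index
  have hlast : (pyMaxA ((h :: h2 :: t).dropLast) < PySem.List.pyGetD (h :: h2 :: t) (-1) 0)
      ↔ condR (h :: h2 :: t) (t.length + 1) = true := by
    rw [PySem.List.pyGetD_neg_one _ _ hp, pyMaxA_lt' _ hdl, condR_iff]
    have hidx : (h :: h2 :: t).length - 1 = t.length + 1 := by simp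
    have hgd : (h :: h2 :: t).getD (t.length + 1) 0 = (h :: h2 :: t).getLast hp := by
      rw [List.getD_eq_getElem?_getD, List.getElem?_eq_getElem (by simp)]
      simp [List.getLast_eq_getElem]
    rw [hgd, List.dropLast_eq_take, hlen]
    constructor
    · intro hall
      refine ⟨by simpa using hall, ?_⟩
      intro x hx
      rw [show t.length + 1 + 1 = (h :: h2 :: t).length by simp] at hx
      simp at hx
    · intro ⟨hall, _⟩
      simpa using hall
  -- the leading check is the partition condition at index 0
  have h0 : (PySem.List.pyGetD (h :: h2 :: t) 0 0
        < pyMinA (PySem.List.slice (h :: h2 :: t) (some 1) none))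
      ↔ condR (h :: h2 :: t) 0 = true := by
    rw [PySem.List.slice_from_one, PySem.List.pyGetD_zero_cons]
    show h < pyMinA (h2 :: t) ↔ _
    rw [lt_pyMinA, condR_iff]
    simp
  -- decompose refP's search into head, middle, last
  have hrange : List.range (h :: h2 :: t).length
      = 0 :: ((List.range t.length).map (fun j => j + 1) ++ [t.length + 1]) := by
    rw [hlen, show t.length + 2 = (t.length + 1) + 1 by ring, List.range_succ_eq_map,
      List.range_succ]
    simp [Nat.succ_eq_add_one]
  unfold deliciBod refP
  rw [if_neg (by simp), if_neg (by simp), hrange]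
  simp only [PySem.List.slice_to_neg_one]
  by_cases hc0 : condR (h :: h2 :: t) 0 = true
  · rw [if_pos (h0.mpr hc0), List.find?_cons_of_pos hc0]
    simp
  · rw [if_neg (fun hc => hc0 (h0.mp hc)),
      List.find?_cons_of_neg (by simpa using hc0),
      List.find?_append, List.find?_map, hloop,
      show (condR (h :: h2 :: t) ∘ fun j => j + 1) = fun j => condR (h :: h2 :: t) (j + 1)
        from rfl]
    cases hmid : (List.range t.length).find? (fun j => condR (h :: h2 :: t) (j + 1)) with
    | some j =>
      simp only [Option.map_some, Option.or]
      push_cast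
      ring
    | none =>
      simp only [Option.map_none, Option.none_or]
      by_cases hcl : condR (h :: h2 :: t) (t.length + 1) = true
      · rw [List.find?_cons_of_pos hcl, if_pos (hlast.mpr hcl)]
        rw [hlen]
        push_cast
        ring
      · rw [List.find?_cons_of_neg (by simpa using hcl),
          if_neg (fun hc => hcl (hlast.mp hc))]
        rfl

-- ===== VERDICT (by name: the statement is the Claim_ definition above) =====
theorem deliciBod_spec : Claim_equal_deliciBod := by
  intro p _
  unfold Spec_deliciBod
  rw [A_eq_ref, B_eq_ref]
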